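-- pv_equiv track=rewrite | github.com/ceedee666/aoc_2023 | day_22/day_22.py | drop_bricks
-- ===== SOURCE A (Python) =====
-- from collections import defaultdict, deque
--
-- def all_coords(s: tuple[int, ...], e: tuple[int, ...]) -> list[tuple[int, ...]]:
--     x_s, y_s, z_s = s
--     x_e, y_e, z_e = e
--
--     if x_s != x_e:
--         return [(x, y_s, z_s) for x in range(min(x_s, x_e), max(x_s, x_e) + 1)]
--     elif y_s != y_e:
--         return [(x_s, y, z_s) for y in range(min(y_s, y_e), max(y_s, y_e) + 1)]
--     else:
--         return [(x_s, y_s, z) for z in range(min(z_s, z_e), max(z_s, z_e) + 1)]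
--
-- def drop_bricks(
--     bricks: list[tuple[tuple[int, ...], tuple[int, ...]]]
-- ) -> list[tuple[tuple[int, ...], tuple[int, ...]]]:
--     height = defaultdict(int)
--     dropped_bricks = []
--
--     # sort bricks by z coordinate
--     bricks = sorted(bricks, key=lambda b: b[0][2])
--
--     for s, e in bricks:
--         x_s, y_s, z_s = s
--         x_e, y_e, z_e = e
--
--         new_z = max([height[(x, y)] for x, y, _ in all_coords(s, e)]) + 1
--
--         if x_s == x_e and y_s == y_e:
--             new_s = (x_s, y_s, new_z)
--             new_e = (x_e, y_e, new_z + (z_e - z_s))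
--         else:
--             new_s = (x_s, y_s, new_z)
--             new_e = (x_e, y_e, new_z)
--
--         dropped_bricks.append((new_s, new_e))
--         for x, y, z in all_coords(new_s, new_e):
--             height[(x, y)] = z
--
--     return dropped_bricks
-- ===== SOURCE B (Python) =====
-- def drop_bricks(bricks):
--     order = sorted(bricks, key=lambda b: b[0][2])
--     settled = []  # ((xlo, xhi), (ylo, yhi), top): footprint rectangle + top z of each placed brick
--     result = []
--     for s, e in order:
--         x_s, y_s, z_s = s
--         x_e, y_e, z_e = e
--         if x_s != x_e:
--             xlo, xhi = min(x_s, x_e), max(x_s, x_e)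
--             ylo, yhi = y_s, y_s
--         else:
--             xlo, xhi = x_s, x_s
--             ylo, yhi = min(y_s, y_e), max(y_s, y_e)
--         support = 0
--         for (a, b), (c, d), t in settled:
--             if a <= xhi and xlo <= b and c <= yhi and ylo <= d and t > support:
--                 support = t
--         new_z = support + 1
--         if x_s == x_e and y_s == y_e:
--             end_z = new_z + (z_e - z_s)
--         else:
--             end_z = new_z
--         settled.append(((xlo, xhi), (ylo, yhi), max(new_z, end_z)))
--         result.append(((x_s, y_s, new_z), (x_e, y_e, end_z)))
--     return result
-- ===== Notes on version B (the rewrite author's own statement) =====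
-- stated objective: alternative
-- what changed: B replaces A's per-column height dictionary (updated cell by cell via all_coords) with a list of settled bricks stored as footprint rectangles plus top height, computing each brick's rest height by an interval-overlap max scan over previously settled bricks instead of dictionary lookups per cell.
import Mathlib
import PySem

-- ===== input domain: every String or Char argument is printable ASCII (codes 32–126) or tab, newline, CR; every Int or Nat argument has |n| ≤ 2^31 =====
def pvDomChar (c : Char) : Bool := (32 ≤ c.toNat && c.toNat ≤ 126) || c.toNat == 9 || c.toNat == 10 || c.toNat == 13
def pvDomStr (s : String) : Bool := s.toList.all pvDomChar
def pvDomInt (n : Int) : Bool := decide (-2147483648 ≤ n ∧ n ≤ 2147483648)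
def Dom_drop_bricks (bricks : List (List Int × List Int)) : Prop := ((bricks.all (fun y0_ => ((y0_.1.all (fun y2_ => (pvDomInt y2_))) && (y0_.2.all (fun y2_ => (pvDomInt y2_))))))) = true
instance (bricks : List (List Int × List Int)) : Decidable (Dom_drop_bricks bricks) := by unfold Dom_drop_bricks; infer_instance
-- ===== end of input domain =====

-- B replaces A's per-column height dict (written cell by cell) with a list of settled footprint
-- rectangles scanned with interval-overlap tests; same return value, no speed claim.

-- ===== PORT A =====
-- Python tuple unpacking 'x, y, z = t': raises ValueError unless len(t) == 3; Pre_ excludes other lengths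
def unpack3 (l : List Int) : Int × Int × Int :=
  match l with
  | [a, b, c] => (a, b, c)
  | _ => (0, 0, 0)

def all_coords (s e : List Int) : List (Int × Int × Int) :=
  let (x_s, y_s, z_s) := unpack3 s
  let (x_e, y_e, z_e) := unpack3 e
  if x_s ≠ x_e then
    (PySem.List.pyRange (min x_s x_e) (max x_s x_e + 1) 1).map (fun x => (x, y_s, z_s))
  else if y_s ≠ y_e then
    (PySem.List.pyRange (min y_s y_e) (max y_s y_e + 1) 1).map (fun y => (x_s, y, z_s))
  else
    (PySem.List.pyRange (min z_s z_e) (max z_s z_e + 1) 1).map (fun z => (x_s, y_s, z))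

-- one iteration of A's main loop; defaultdict reads are ported as getD 0 (only lookups are
-- observed — height.values()/keys() are never used, so the implicit key insertion is invisible)
def dropStepA (st : PySem.Dict (Int × Int) Int × List (List Int × List Int))
    (br : List Int × List Int) : PySem.Dict (Int × Int) Int × List (List Int × List Int) :=
  let (s, e) := br
  let (x_s, y_s, z_s) := unpack3 s
  let (x_e, y_e, z_e) := unpack3 e
  let new_z := ((PySem.List.max? ((all_coords s e).map (fun c => st.1.getD (c.1, c.2.1) 0))
      (fun v => v)).getD 0) + 1
  let se : List Int × List Int :=
    if x_s = x_e ∧ y_s = y_e then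
      ([x_s, y_s, new_z], [x_e, y_e, new_z + (z_e - z_s)])
    else
      ([x_s, y_s, new_z], [x_e, y_e, new_z])
  let height := (all_coords se.1 se.2).foldl (fun d c => d.insert (c.1, c.2.1) c.2.2) st.1
  (height, st.2 ++ [se])

def drop_bricks (bricks : List (List Int × List Int)) : List (List Int × List Int) :=
  let sortedBricks := PySem.List.sorted bricks (fun b => PySem.List.pyGetD b.1 2 0) false
  (sortedBricks.foldl dropStepA (PySem.Dict.empty, [])).2

-- ===== PORT B =====
-- one iteration of B's loop: settled list entries are ((xlo, xhi), (ylo, yhi), top)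
def dropStepB (st : List ((Int × Int) × (Int × Int) × Int) × List (List Int × List Int))
    (br : List Int × List Int) : List ((Int × Int) × (Int × Int) × Int) × List (List Int × List Int) :=
  let (s, e) := br
  let (x_s, y_s, z_s) := unpack3 s
  let (x_e, y_e, z_e) := unpack3 e
  let r : Int × Int × Int × Int :=
    if x_s ≠ x_e then (min x_s x_e, max x_s x_e, y_s, y_s)
    else (x_s, x_s, min y_s y_e, max y_s y_e)
  let support := st.1.foldl (fun sup t =>
    if t.1.1 ≤ r.2.1 ∧ r.1 ≤ t.1.2 ∧ t.2.1.1 ≤ r.2.2.2 ∧ r.2.2.1 ≤ t.2.1.2 ∧ sup < t.2.2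
    then t.2.2 else sup) 0
  let new_z := support + 1
  let end_z := if x_s = x_e ∧ y_s = y_e then new_z + (z_e - z_s) else new_z
  (st.1 ++ [((r.1, r.2.1), (r.2.2.1, r.2.2.2), max new_z end_z)],
   st.2 ++ [([x_s, y_s, new_z], [x_e, y_e, end_z])])

def drop_bricks_alt (bricks : List (List Int × List Int)) : List (List Int × List Int) :=
  let order := PySem.List.sorted bricks (fun b => PySem.List.pyGetD b.1 2 0) false
  (order.foldl dropStepB ([], [])).2

-- ===== PRECONDITION & SPEC =====
-- Pre_ excludes exactly the inputs where A raises ValueError: a brick endpoint tuple of length ≠ 3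
def Pre_drop_bricks (bricks : List (List Int × List Int)) : Prop :=
  ∀ b ∈ bricks, b.1.length = 3 ∧ b.2.length = 3
instance (bricks : List (List Int × List Int)) : Decidable (Pre_drop_bricks bricks) := by
  unfold Pre_drop_bricks; infer_instance

def pvWitness_drop_bricks : (List (List Int × List Int)) :=
  [([0, 0, 2], [2, 0, 2]), ([1, 0, 1], [1, 2, 1]), ([0, 0, 5], [0, 0, 7])]

def Spec_drop_bricks (bricks : List (List Int × List Int)) (out : List (List Int × List Int)) : Prop := out = drop_bricks_alt bricks
instance (bricks : List (List Int × List Int)) (out : List (List Int × List Int)) : Decidable (Spec_drop_bricks bricks out) := by unfold Spec_drop_bricks; infer_instance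

-- ===== CLAIM (what is proved, stated in full; the proofs are below) =====
def Claim_equal_drop_bricks : Prop := ∀ (bricks : List (List Int × List Int)), Dom_drop_bricks bricks → Pre_drop_bricks bricks → Spec_drop_bricks bricks (drop_bricks bricks)

-- ===== LEMMAS AND PROOFS =====

-- the height of the tallest settled brick whose footprint covers column c (0 if none)
def colH (settled : List ((Int × Int) × (Int × Int) × Int)) (c : Int × Int) : Int :=
  settled.foldl (fun h t =>
    if t.1.1 ≤ c.1 ∧ c.1 ≤ t.1.2 ∧ t.2.1.1 ≤ c.2 ∧ c.2 ≤ t.2.1.2 then max h t.2.2 else h) 0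

-- simulation invariant between A's dict and B's settled list
def SimInv (d : PySem.Dict (Int × Int) Int) (settled : List ((Int × Int) × (Int × Int) × Int)) : Prop :=
  (∀ c : Int × Int, d.getD c 0 = colH settled c) ∧
  (∀ t ∈ settled, t.1.1 ≤ t.1.2 ∧ t.2.1.1 ≤ t.2.1.2 ∧ 1 ≤ t.2.2)

lemma le_foldl_of_le {α : Type} (f : Int → α → Int) (hf : ∀ b t, b ≤ f b t) :
    ∀ (l : List α) (a : Int), a ≤ l.foldl f a := by
  intro l
  induction l with
  | nil => intro a; simp
  | cons t l ih => intro a; exact le_trans (hf a t) (ih (f a t))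

lemma colH_nonneg (settled : List ((Int × Int) × (Int × Int) × Int)) (c : Int × Int) :
    0 ≤ colH settled c := by
  apply le_foldl_of_le
  intro b t; split <;> simp

lemma colH_append_single (l : List ((Int × Int) × (Int × Int) × Int))
    (t : (Int × Int) × (Int × Int) × Int) (c : Int × Int) :
    colH (l ++ [t]) c =
      max (colH l c)
        (if t.1.1 ≤ c.1 ∧ c.1 ≤ t.1.2 ∧ t.2.1.1 ≤ c.2 ∧ c.2 ≤ t.2.1.2 then t.2.2 else 0) := by
  unfold colH
  rw [List.foldl_append]
  simp only [List.foldl_cons, List.foldl_nil]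
  have := colH_nonneg l c
  unfold colH at this
  split <;> omega

lemma foldl_max_distrib (f g : (Int × Int) → Int) :
    ∀ (l : List (Int × Int)) (a b : Int),
    l.foldl (fun h c => max h (max (f c) (g c))) (max a b) =
      max (l.foldl (fun h c => max h (f c)) a) (l.foldl (fun h c => max h (g c)) b) := by
  intro l
  induction l with
  | nil => intro a b; rfl
  | cons c l ih =>
    intro a b
    simp only [List.foldl_cons]
    rw [← ih (max a (f c)) (max b (g c))]
    congr 1
    omega

lemma foldl_max_ite_exists (q : (Int × Int) → Prop) [DecidablePred q] (v : Int) (hv : 0 ≤ v) :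
    ∀ (l : List (Int × Int)) (a : Int), 0 ≤ a → a ≤ v →
    l.foldl (fun h c => max h (if q c then v else 0)) a =
      if ∃ c ∈ l, q c then v else a := by
  intro l
  induction l with
  | nil => intro a _ _; simp
  | cons c l ih =>
    intro a ha hav
    simp only [List.foldl_cons]
    by_cases hq : q c
    · rw [if_pos hq]
      rw [ih (max a v) (by omega) (by omega)]
      have : ∃ x ∈ c :: l, q x := ⟨c, by simp, hq⟩
      rw [if_pos this]
      split <;> omega
    · rw [if_neg hq]
      rw [ih (max a 0) (by omega) (by omega)]
      have hmax : max a 0 = a := by omega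
      rw [hmax]
      by_cases hex : ∃ x ∈ l, q x
      · rw [if_pos hex, if_pos ⟨hex.choose, by simp [hex.choose_spec.1], hex.choose_spec.2⟩]
      · rw [if_neg hex, if_neg (by rintro ⟨x, hx, hqx⟩; rcases List.mem_cons.1 hx with rfl | hx; exact hq hqx; exact hex ⟨x, hx, hqx⟩)]

-- the core exchange: max over the footprint's columns of colH = scan of the settled list
lemma scan_eq_maxcols (xlo xhi ylo yhi : Int) (hx : xlo ≤ xhi) (hy : ylo ≤ yhi)
    (cols : List (Int × Int))
    (hmem : ∀ c : Int × Int, c ∈ cols ↔ (xlo ≤ c.1 ∧ c.1 ≤ xhi ∧ ylo ≤ c.2 ∧ c.2 ≤ yhi)) :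
    ∀ (settled : List ((Int × Int) × (Int × Int) × Int)),
    (∀ t ∈ settled, t.1.1 ≤ t.1.2 ∧ t.2.1.1 ≤ t.2.1.2 ∧ 1 ≤ t.2.2) →
    cols.foldl (fun h c => max h (colH settled c)) 0 =
      settled.foldl (fun sup t =>
        if t.1.1 ≤ xhi ∧ xlo ≤ t.1.2 ∧ t.2.1.1 ≤ yhi ∧ ylo ≤ t.2.1.2 ∧ sup < t.2.2
        then t.2.2 else sup) 0 := by
  intro settled
  induction settled using List.reverseRecOn with
  | nil =>
    intro _
    simp only [colH, List.foldl_nil]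
    have : ∀ (l : List (Int × Int)) (a : Int), 0 ≤ a → l.foldl (fun h _ => max h 0) a = a := by
      intro l
      induction l with
      | nil => intro a _; rfl
      | cons c l ih => intro a ha; simp only [List.foldl_cons]; rw [show max a 0 = a by omega]; exact ih a ha
    exact this cols 0 le_rfl
  | append_singleton settled t ih =>
    intro hwf
    have hwf' : ∀ u ∈ settled, u.1.1 ≤ u.1.2 ∧ u.2.1.1 ≤ u.2.1.2 ∧ 1 ≤ u.2.2 :=
      fun u hu => hwf u (by simp [hu])
    have htwf := hwf t (by simp)
    -- rewrite colH over the snoc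
    have hbody : (fun (h : Int) (c : Int × Int) => max h (colH (settled ++ [t]) c)) =
        (fun h c => max h (max (colH settled c)
          (if t.1.1 ≤ c.1 ∧ c.1 ≤ t.1.2 ∧ t.2.1.1 ≤ c.2 ∧ c.2 ≤ t.2.1.2 then t.2.2 else 0))) := by
      funext h c; rw [colH_append_single]
    rw [hbody]
    have hdist := foldl_max_distrib (fun c => colH settled c)
      (fun c => if t.1.1 ≤ c.1 ∧ c.1 ≤ t.1.2 ∧ t.2.1.1 ≤ c.2 ∧ c.2 ≤ t.2.1.2 then t.2.2 else 0)
      cols 0 0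
    simp only [max_self] at hdist
    rw [hdist]
    rw [ih hwf']
    rw [foldl_max_ite_exists _ t.2.2 (by omega) cols 0 le_rfl (by omega)]
    rw [List.foldl_append]
    simp only [List.foldl_cons, List.foldl_nil]
    have hexiff : (∃ c ∈ cols, t.1.1 ≤ c.1 ∧ c.1 ≤ t.1.2 ∧ t.2.1.1 ≤ c.2 ∧ c.2 ≤ t.2.1.2) ↔
        (t.1.1 ≤ xhi ∧ xlo ≤ t.1.2 ∧ t.2.1.1 ≤ yhi ∧ ylo ≤ t.2.1.2) := by
      constructor
      · rintro ⟨c, hc, hcov⟩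
        have := (hmem c).1 hc
        omega
      · intro h
        refine ⟨(max xlo t.1.1, max ylo t.2.1.1), (hmem _).2 (by simp; omega), by simp; omega⟩
    have hscan0 : 0 ≤ settled.foldl (fun sup t =>
        if t.1.1 ≤ xhi ∧ xlo ≤ t.1.2 ∧ t.2.1.1 ≤ yhi ∧ ylo ≤ t.2.1.2 ∧ sup < t.2.2
        then t.2.2 else sup) 0 := by
      apply le_foldl_of_le
      intro b u; split <;> omega
    by_cases hint : t.1.1 ≤ xhi ∧ xlo ≤ t.1.2 ∧ t.2.1.1 ≤ yhi ∧ ylo ≤ t.2.1.2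
    · rw [if_pos (hexiff.2 hint)]
      split <;> omega
    · rw [if_neg (fun h => hint (hexiff.1 h))]
      rw [if_neg (by intro h; exact hint ⟨h.1, h.2.1, h.2.2.1, h.2.2.2.1⟩)]
      omega

lemma getD_foldl_insert_const (y v : Int) :
    ∀ (l : List Int) (d : PySem.Dict (Int × Int) Int) (col : Int × Int),
    (l.foldl (fun d x => d.insert (x, y) v) d).getD col 0 =
      if col.2 = y ∧ col.1 ∈ l then v else d.getD col 0 := by
  intro l
  induction l with
  | nil => intro d col; simp
  | cons x l ih =>
    intro d col
    simp only [List.foldl_cons]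
    rw [ih, PySem.Dict.getD_insert]
    rcases col with ⟨cx, cy⟩
    simp only [List.mem_cons, Prod.mk.injEq]
    split_ifs <;> simp_all

lemma getD_foldl_insert_const_x (x v : Int) :
    ∀ (l : List Int) (d : PySem.Dict (Int × Int) Int) (col : Int × Int),
    (l.foldl (fun d yy => d.insert (x, yy) v) d).getD col 0 =
      if col.1 = x ∧ col.2 ∈ l then v else d.getD col 0 := by
  intro l
  induction l with
  | nil => intro d col; simp
  | cons yy l ih =>
    intro d col
    simp only [List.foldl_cons]
    rw [ih, PySem.Dict.getD_insert]
    rcases col with ⟨cx, cy⟩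
    simp only [List.mem_cons, Prod.mk.injEq]
    split_ifs <;> simp_all

lemma getD_foldl_insert_samekey (k : Int × Int) :
    ∀ (l : List Int) (d : PySem.Dict (Int × Int) Int) (col : Int × Int), col ≠ k →
    (l.foldl (fun d z => d.insert k z) d).getD col 0 = d.getD col 0 := by
  intro l
  induction l with
  | nil => intro d col _; rfl
  | cons z l ih =>
    intro d col hne
    simp only [List.foldl_cons]
    rw [ih _ _ hne, PySem.Dict.getD_insert, if_neg hne]

lemma getD_foldl_insert_range (k : Int × Int) (a b : Int) (hab : a ≤ b)
    (d : PySem.Dict (Int × Int) Int) (col : Int × Int) :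
    ((PySem.List.pyRange a (b + 1) 1).foldl (fun d z => d.insert k z) d).getD col 0 =
      if col = k then b else d.getD col 0 := by
  rw [PySem.List.pyRange_one_succ_right hab, List.foldl_append]
  simp only [List.foldl_cons, List.foldl_nil]
  rw [PySem.Dict.getD_insert]
  split_ifs with h
  · rfl
  · exact getD_foldl_insert_samekey k _ d col h

lemma exists3 (l : List Int) (h : l.length = 3) : ∃ a b c, l = [a, b, c] := by
  rcases l with _ | ⟨a, _ | ⟨b, _ | ⟨c, _ | ⟨dd, l⟩⟩⟩⟩ <;> simp at h
  exact ⟨a, b, c, rfl⟩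

lemma maxA_eq (w : Int × Int) (ws : List (Int × Int × Int))
    (d : PySem.Dict (Int × Int) Int) (settled : List ((Int × Int) × (Int × Int) × Int))
    (hd : ∀ c : Int × Int, d.getD c 0 = colH settled c) :
    ((PySem.List.max? (d.getD w 0 :: ws.map (fun c => d.getD (c.1, c.2.1) 0)) (fun v => v)).getD 0) =
      (w :: ws.map (fun c => (c.1, c.2.1))).foldl (fun h c => max h (colH settled c)) 0 := by
  simp only [PySem.List.max?_id_cons, Option.getD_some, List.foldl_cons,
    List.foldl_map, hd]
  have h0 : max 0 (colH settled w) = colH settled w := by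
    have := colH_nonneg settled w; omega
  rw [h0]

-- one step of the two loops, related by SimInv
lemma step_sim (d : PySem.Dict (Int × Int) Int) (settled : List ((Int × Int) × (Int × Int) × Int))
    (accA accB : List (List Int × List Int)) (br : List Int × List Int)
    (hlen : br.1.length = 3 ∧ br.2.length = 3) (hinv : SimInv d settled) (hacc : accA = accB) :
    (dropStepA (d, accA) br).2 = (dropStepB (settled, accB) br).2 ∧
    SimInv (dropStepA (d, accA) br).1 (dropStepB (settled, accB) br).1 := by
  obtain ⟨s, e⟩ := br
  obtain ⟨hs, he⟩ := hlen
  obtain ⟨x_s, y_s, z_s, rfl⟩ := exists3 s hs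
  obtain ⟨x_e, y_e, z_e, rfl⟩ := exists3 e he
  subst hacc
  by_cases hxx : x_s = x_e
  · subst hxx
    have hfx : ¬(x_s ≠ x_s) := fun h => h rfl
    by_cases hyy : y_s = y_e
    · -- vertical brick (single column)
      subst hyy
      have hfy : ¬(y_s ≠ y_s) := fun h => h rfl
      simp only [dropStepA, dropStepB, all_coords, unpack3, if_neg hfx, if_neg hfy,
        min_self, max_self, and_self, if_true]
      set lo := min z_s z_e with hlo
      set hi := max z_s z_e with hhi
      have hlohi : lo ≤ hi := min_le_of_left_le (le_max_left _ _)
      have hlt : lo < hi + 1 := by omega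
      have hcons : PySem.List.pyRange lo (hi + 1) = lo :: PySem.List.pyRange (lo + 1) (hi + 1) :=
        PySem.List.pyRange_one_cons hlt
      rw [hcons]
      simp only [List.map_cons]
      rw [maxA_eq (x_s, y_s) ((PySem.List.pyRange (lo + 1) (hi + 1)).map (fun z => (x_s, y_s, z)))
        d settled hinv.1]
      have hmem : ∀ c : Int × Int,
          c ∈ ((x_s, y_s) :: List.map (fun c => (c.1, c.2.1))
                ((PySem.List.pyRange (lo + 1) (hi + 1)).map (fun z => (x_s, y_s, z)))) ↔
            (x_s ≤ c.1 ∧ c.1 ≤ x_s ∧ y_s ≤ c.2 ∧ c.2 ≤ y_s) := by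
        rintro ⟨cx, cy⟩
        simp only [List.map_map, List.mem_cons, List.mem_map, Function.comp,
          PySem.List.mem_pyRange_one, Prod.mk.injEq]
        constructor
        · rintro (⟨rfl, rfl⟩ | ⟨z, hz, rfl, rfl⟩) <;> omega
        · rintro ⟨h1, h2, h3, h4⟩
          exact Or.inl ⟨by omega, by omega⟩
      have hscan := scan_eq_maxcols x_s x_s y_s y_s le_rfl le_rfl _ hmem settled hinv.2
      rw [hscan]
      have hscan0 : 0 ≤ List.foldl (fun sup t =>
          if t.1.1 ≤ x_s ∧ x_s ≤ t.1.2 ∧ t.2.1.1 ≤ y_s ∧ y_s ≤ t.2.1.2 ∧ sup < t.2.2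
          then t.2.2 else sup) 0 settled := by
        apply le_foldl_of_le; intro b u; split <;> omega
      refine ⟨rfl, ?_, ?_⟩
      · intro col
        simp only [List.foldl_map]
        rw [getD_foldl_insert_range _ _ _ (min_le_of_left_le (le_max_left _ _))]
        rcases col with ⟨cx, cy⟩
        rw [colH_append_single]
        dsimp only
        have hle := (PySem.List.le_foldl_max_int
          ((x_s, y_s) :: List.map (fun c => (c.1, c.2.1))
            ((PySem.List.pyRange (lo + 1) (hi + 1)).map (fun z => (x_s, y_s, z))))
          (fun c => colH settled c) 0).2 (x_s, y_s) (by simp)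
        rw [hscan] at hle
        by_cases h1 : (cx, cy) = (x_s, y_s)
        · rw [if_pos h1]
          rw [Prod.mk.injEq] at h1
          rw [if_pos (show x_s ≤ cx ∧ cx ≤ x_s ∧ y_s ≤ cy ∧ cy ≤ y_s by omega)]
          obtain ⟨rfl, rfl⟩ := h1
          omega
        · rw [if_neg h1]
          rw [Prod.mk.injEq] at h1
          rw [if_neg (by rintro ⟨ha, hb, hc, hd⟩; exact h1 ⟨by omega, by omega⟩)]
          rw [hinv.1 (cx, cy)]
          have := colH_nonneg settled (cx, cy)
          omega
      · intro t ht
        rcases List.mem_append.1 ht with h | h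
        · exact hinv.2 t h
        · simp only [List.mem_singleton] at h
          subst h
          refine ⟨le_rfl, le_rfl, ?_⟩
          dsimp only
          omega
    · -- horizontal along y
      simp only [dropStepA, dropStepB, all_coords, unpack3, ne_eq, not_true,
        hyy, not_false_eq_true, true_and, if_true, if_false]
      set lo := min y_s y_e with hlo
      set hi := max y_s y_e with hhi
      have hlohi : lo ≤ hi := min_le_of_left_le (le_max_left _ _)
      have hlt : lo < hi + 1 := by omega
      have hcons : PySem.List.pyRange lo (hi + 1) = lo :: PySem.List.pyRange (lo + 1) (hi + 1) :=
        PySem.List.pyRange_one_cons hlt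
      rw [hcons]
      simp only [List.map_cons]
      rw [maxA_eq (x_s, lo) ((PySem.List.pyRange (lo + 1) (hi + 1)).map (fun y => (x_s, y, z_s)))
        d settled hinv.1]
      have hmem : ∀ c : Int × Int,
          c ∈ ((x_s, lo) :: List.map (fun c => (c.1, c.2.1))
                ((PySem.List.pyRange (lo + 1) (hi + 1)).map (fun y => (x_s, y, z_s)))) ↔
            (x_s ≤ c.1 ∧ c.1 ≤ x_s ∧ lo ≤ c.2 ∧ c.2 ≤ hi) := by
        rintro ⟨cx, cy⟩
        simp only [List.map_map, List.mem_cons, List.mem_map, Function.comp,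
          PySem.List.mem_pyRange_one, Prod.mk.injEq]
        constructor
        · rintro (⟨rfl, rfl⟩ | ⟨y, hy, rfl, rfl⟩) <;> omega
        · rintro ⟨h1, h2, h3, h4⟩
          by_cases hcy : cy = lo
          · exact Or.inl ⟨by omega, hcy⟩
          · exact Or.inr ⟨cy, by omega, by omega, rfl⟩
      have hscan := scan_eq_maxcols x_s x_s lo hi le_rfl hlohi _ hmem settled hinv.2
      rw [hscan]
      have hscan0 : 0 ≤ List.foldl (fun sup t =>
          if t.1.1 ≤ x_s ∧ x_s ≤ t.1.2 ∧ t.2.1.1 ≤ hi ∧ lo ≤ t.2.1.2 ∧ sup < t.2.2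
          then t.2.2 else sup) 0 settled := by
        apply le_foldl_of_le; intro b u; split <;> omega
      refine ⟨rfl, ?_, ?_⟩
      · intro col
        simp only [List.foldl_cons, List.foldl_map]
        rw [getD_foldl_insert_const_x, PySem.Dict.getD_insert]
        rcases col with ⟨cx, cy⟩
        rw [colH_append_single]
        simp only [max_self]
        have hle : ∀ cc : Int × Int, cc ∈ ((x_s, lo) :: List.map (fun c => (c.1, c.2.1))
              ((PySem.List.pyRange (lo + 1) (hi + 1)).map (fun y => (x_s, y, z_s)))) →
            colH settled cc ≤ List.foldl (fun sup t =>
              if t.1.1 ≤ x_s ∧ x_s ≤ t.1.2 ∧ t.2.1.1 ≤ hi ∧ lo ≤ t.2.1.2 ∧ sup < t.2.2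
              then t.2.2 else sup) 0 settled := by
          intro cc hcc
          have h := (PySem.List.le_foldl_max_int
            ((x_s, lo) :: List.map (fun c => (c.1, c.2.1))
              ((PySem.List.pyRange (lo + 1) (hi + 1)).map (fun y => (x_s, y, z_s))))
            (fun c => colH settled c) 0).2 cc hcc
          rw [hscan] at h
          exact h
        by_cases h1 : cx = x_s ∧ cy ∈ PySem.List.pyRange (lo + 1) (hi + 1)
        · rw [if_pos h1]
          have hb := PySem.List.mem_pyRange_one.1 h1.2
          rw [if_pos (show x_s ≤ cx ∧ cx ≤ x_s ∧ lo ≤ cy ∧ cy ≤ hi by omega)]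
          have := hle (cx, cy) ((hmem (cx, cy)).2 (by omega))
          omega
        · rw [if_neg h1]
          by_cases h2 : (cx, cy) = (x_s, lo)
          · rw [if_pos h2]
            rw [Prod.mk.injEq] at h2
            rw [if_pos (show x_s ≤ cx ∧ cx ≤ x_s ∧ lo ≤ cy ∧ cy ≤ hi by omega)]
            have := hle (cx, cy) ((hmem (cx, cy)).2 (by omega))
            omega
          · rw [if_neg h2]
            rw [Prod.mk.injEq] at h2
            rw [if_neg (by
              rintro ⟨ha, hb, hc, hd⟩
              have hcx : cx = x_s := le_antisymm hb ha
              by_cases hcy : cy = lo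
              · exact h2 ⟨hcx, hcy⟩
              · exact h1 ⟨hcx, PySem.List.mem_pyRange_one.2 ⟨by omega, by omega⟩⟩)]
            rw [hinv.1 (cx, cy)]
            have := colH_nonneg settled (cx, cy)
            omega
      · intro t ht
        rcases List.mem_append.1 ht with h | h
        · exact hinv.2 t h
        · simp only [List.mem_singleton] at h
          subst h
          refine ⟨le_rfl, by omega, by simp only [max_self]; omega⟩
  · -- horizontal along x
    have hcond : ¬(x_s = x_e ∧ y_s = y_e) := fun h => hxx h.1
    simp only [dropStepA, dropStepB, all_coords, unpack3, if_pos hxx, if_neg hcond]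
    set lo := min x_s x_e with hlo
    set hi := max x_s x_e with hhi
    have hlohi : lo ≤ hi := min_le_of_left_le (le_max_left _ _)
    have hlt : lo < hi + 1 := by omega
    have hcons : PySem.List.pyRange lo (hi + 1) = lo :: PySem.List.pyRange (lo + 1) (hi + 1) :=
      PySem.List.pyRange_one_cons hlt
    rw [hcons]
    simp only [List.map_cons]
    rw [maxA_eq (lo, y_s) ((PySem.List.pyRange (lo + 1) (hi + 1)).map (fun x => (x, y_s, z_s)))
      d settled hinv.1]
    have hmem : ∀ c : Int × Int,
        c ∈ ((lo, y_s) :: List.map (fun c => (c.1, c.2.1))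
              ((PySem.List.pyRange (lo + 1) (hi + 1)).map (fun x => (x, y_s, z_s)))) ↔
          (lo ≤ c.1 ∧ c.1 ≤ hi ∧ y_s ≤ c.2 ∧ c.2 ≤ y_s) := by
      rintro ⟨cx, cy⟩
      simp only [List.map_map, List.mem_cons, List.mem_map, Function.comp,
        PySem.List.mem_pyRange_one, Prod.mk.injEq]
      constructor
      · rintro (⟨rfl, rfl⟩ | ⟨x, hx, rfl, rfl⟩) <;> omega
      · rintro ⟨h1, h2, h3, h4⟩
        by_cases hcx : cx = lo
        · exact Or.inl ⟨hcx, by omega⟩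
        · exact Or.inr ⟨cx, by omega, rfl, by omega⟩
    have hscan := scan_eq_maxcols lo hi y_s y_s hlohi le_rfl _ hmem settled hinv.2
    rw [hscan]
    have hscan0 : 0 ≤ List.foldl (fun sup t =>
        if t.1.1 ≤ hi ∧ lo ≤ t.1.2 ∧ t.2.1.1 ≤ y_s ∧ y_s ≤ t.2.1.2 ∧ sup < t.2.2
        then t.2.2 else sup) 0 settled := by
      apply le_foldl_of_le; intro b u; split <;> omega
    refine ⟨rfl, ?_, ?_⟩
    · -- dict/colH pointwise
      intro col
      simp only [List.foldl_cons, List.foldl_map]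
      rw [getD_foldl_insert_const, PySem.Dict.getD_insert]
      rcases col with ⟨cx, cy⟩
      rw [colH_append_single]
      simp only [max_self]
      have hle : ∀ cc : Int × Int, cc ∈ ((lo, y_s) :: List.map (fun c => (c.1, c.2.1))
            ((PySem.List.pyRange (lo + 1) (hi + 1)).map (fun x => (x, y_s, z_s)))) →
          colH settled cc ≤ List.foldl (fun sup t =>
            if t.1.1 ≤ hi ∧ lo ≤ t.1.2 ∧ t.2.1.1 ≤ y_s ∧ y_s ≤ t.2.1.2 ∧ sup < t.2.2
            then t.2.2 else sup) 0 settled := by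
        intro cc hcc
        have h := (PySem.List.le_foldl_max_int
          ((lo, y_s) :: List.map (fun c => (c.1, c.2.1))
            ((PySem.List.pyRange (lo + 1) (hi + 1)).map (fun x => (x, y_s, z_s))))
          (fun c => colH settled c) 0).2 cc hcc
        rw [hscan] at h
        exact h
      by_cases h1 : cy = y_s ∧ cx ∈ PySem.List.pyRange (lo + 1) (hi + 1)
      · rw [if_pos h1]
        have hb := PySem.List.mem_pyRange_one.1 h1.2
        rw [if_pos (show lo ≤ cx ∧ cx ≤ hi ∧ y_s ≤ cy ∧ cy ≤ y_s by omega)]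
        have := hle (cx, cy) ((hmem (cx, cy)).2 (by omega))
        omega
      · rw [if_neg h1]
        by_cases h2 : (cx, cy) = (lo, y_s)
        · rw [if_pos h2]
          rw [Prod.mk.injEq] at h2
          rw [if_pos (show lo ≤ cx ∧ cx ≤ hi ∧ y_s ≤ cy ∧ cy ≤ y_s by omega)]
          have := hle (cx, cy) ((hmem (cx, cy)).2 (by omega))
          omega
        · rw [if_neg h2]
          rw [Prod.mk.injEq] at h2
          rw [if_neg (by
            rintro ⟨ha, hb, hc, hd⟩
            have hcy : cy = y_s := le_antisymm hd hc
            by_cases hcx : cx = lo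
            · exact h2 ⟨hcx, hcy⟩
            · exact h1 ⟨hcy, PySem.List.mem_pyRange_one.2 ⟨by omega, by omega⟩⟩)]
          rw [hinv.1 (cx, cy)]
          have := colH_nonneg settled (cx, cy)
          omega
    · -- wellformedness of the new settled list
      intro t ht
      rcases List.mem_append.1 ht with h | h
      · exact hinv.2 t h
      · simp only [List.mem_singleton] at h
        subst h
        refine ⟨by omega, le_rfl, by simp only [max_self]; omega⟩

lemma loop_sim : ∀ (L : List (List Int × List Int)) (d : PySem.Dict (Int × Int) Int)
    (settled : List ((Int × Int) × (Int × Int) × Int)) (accA accB : List (List Int × List Int)),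
    (∀ b ∈ L, b.1.length = 3 ∧ b.2.length = 3) → SimInv d settled → accA = accB →
    (L.foldl dropStepA (d, accA)).2 = (L.foldl dropStepB (settled, accB)).2 := by
  intro L
  induction L with
  | nil => intro d settled accA accB _ _ hacc; simpa using hacc
  | cons br L ih =>
    intro d settled accA accB hlen hinv hacc
    simp only [List.foldl_cons]
    have h := step_sim d settled accA accB br (hlen br (by simp)) hinv hacc
    have hA : dropStepA (d, accA) br = ((dropStepA (d, accA) br).1, (dropStepA (d, accA) br).2) := rfl
    have hB : dropStepB (settled, accB) br = ((dropStepB (settled, accB) br).1, (dropStepB (settled, accB) br).2) := rfl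
    rw [hA, hB]
    exact ih _ _ _ _ (fun b hb => hlen b (by simp [hb])) h.2 h.1

-- ===== VERDICT (by name: the statement is the Claim_ definition above) =====
theorem drop_bricks_spec : Claim_equal_drop_bricks := by
  intro bricks _hdom hpre
  unfold Spec_drop_bricks drop_bricks drop_bricks_alt
  apply loop_sim
  · intro b hb
    exact hpre b ((PySem.List.mem_sorted bricks (fun b => PySem.List.pyGetD b.1 2 0) false b).1 hb)
  · constructor
    · intro c; simp [colH, PySem.Dict.getD_empty]
    · intro t ht; simp at ht
  · rfl
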